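-- pv_equiv track=rewrite | github.com/nipunagarwala/cs224s_final_project | code/utils/preprocess.py | compute_subphones
-- ===== SOURCE A (Python) =====
-- def triphones(phone, n_phones):
--     """
--     Returns phone repeated n_phones times, evenly divided into 3 triphones.
--     """
--     if phone == "?" or phone == "SIL":
--         return [phone] * n_phones
--
--     tri_repeat = int(n_phones / 3)
--     if n_phones % 3 == 0:
--         tris = [phone + "_0"] * tri_repeat
--         tris += [phone + "_1"] * tri_repeat
--         tris += [phone + "_2"] * tri_repeat
--     elif n_phones % 3 == 1:
--         tris = [phone + "_0"] * tri_repeat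
--         tris += [phone + "_1"] * (tri_repeat + 1)
--         tris += [phone + "_2"] * tri_repeat
--     else:
--         tris = [phone + "_0"] * (tri_repeat + 1)
--         tris += [phone + "_1"] * tri_repeat
--         tris += [phone + "_2"] * (tri_repeat + 1)
--
--     return tris
--
-- def compute_subphones(phones):
--     this_phone = phones[0]
--     n_this_phone = 0
--     subphones = []
--     for p in phones:
--         if p != this_phone:
--             subphones += triphones(this_phone, n_this_phone)
--             this_phone = p
--             n_this_phone = 1
--         else:
--             n_this_phone += 1
--
--     subphones += triphones(this_phone, n_this_phone)
--
--     assert len(subphones) == len(phones)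
--
--     return subphones
-- ===== SOURCE B (Python) =====
-- def offsets(phones):
--     """offsets[i] = position of phones[i] within its run of equal phones."""
--     offs = []
--     prev = None
--     k = 0
--     for p in phones:
--         k = k + 1 if p == prev else 0
--         offs.append(k)
--         prev = p
--     return offs
--
-- def compute_subphones(phones):
--     # per-index labelling: for each frame, its left offset k and right offset r
--     # within its run determine the run length n = k + r + 1 and which third it is in
--     off = offsets(phones)
--     roff = offsets(phones[::-1])[::-1]
--     out = []
--     for p, k, r in zip(phones, off, roff):
--         n = k + r + 1
--         if p == "?" or p == "SIL":
--             out.append(p)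
--         else:
--             c0 = (n + 1) // 3
--             t = 0 if k < c0 else (1 if k < n - c0 else 2)
--             out.append(p + "_" + str(t))
--     return out
-- ===== Notes on version B (the rewrite author's own statement) =====
-- stated objective: alternative
-- what changed: B never expands runs: it computes for every frame its left and right offset within its run (two offset scans, the right one via the reversed list) and labels each frame independently by a closed-form third test, instead of A's running accumulator that flushes replicated triphone blocks at run boundaries.
-- crash fix: On the empty list A raises IndexError at phones[0]; B returns []. — e.g. on compute_subphones([]): A raises IndexError, B returns []
import Mathlib
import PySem

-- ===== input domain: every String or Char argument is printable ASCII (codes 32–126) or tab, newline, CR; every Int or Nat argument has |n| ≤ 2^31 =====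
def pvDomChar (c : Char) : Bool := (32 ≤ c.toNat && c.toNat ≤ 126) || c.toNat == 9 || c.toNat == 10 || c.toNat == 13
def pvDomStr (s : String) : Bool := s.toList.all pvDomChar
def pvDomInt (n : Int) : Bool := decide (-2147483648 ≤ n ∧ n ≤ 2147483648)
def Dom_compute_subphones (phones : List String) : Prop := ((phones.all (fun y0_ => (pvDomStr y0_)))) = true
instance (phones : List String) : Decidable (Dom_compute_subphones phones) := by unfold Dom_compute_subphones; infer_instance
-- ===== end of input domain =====

-- B labels every frame independently from its left/right offsets within its run (two offset
-- scans, one over the reversed list) instead of A's accumulator that flushes replicated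
-- triphone blocks at run boundaries; objective: alternative (same cost, no run expansion).

-- ===== PORT A =====
-- int(n_phones / 3) is ported as floordiv: exact for the nonnegative counts that occur here
def triphonesA (phone : String) (n : Int) : List String :=
  if phone = "?" ∨ phone = "SIL" then List.replicate n.toNat phone
  else
    let r := PySem.Int.floordiv n 3
    if PySem.Int.mod n 3 = 0 then
      List.replicate r.toNat (phone ++ "_0") ++ List.replicate r.toNat (phone ++ "_1") ++
        List.replicate r.toNat (phone ++ "_2")
    else if PySem.Int.mod n 3 = 1 then
      List.replicate r.toNat (phone ++ "_0") ++ List.replicate (r + 1).toNat (phone ++ "_1") ++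
        List.replicate r.toNat (phone ++ "_2")
    else
      List.replicate (r + 1).toNat (phone ++ "_0") ++ List.replicate r.toNat (phone ++ "_1") ++
        List.replicate (r + 1).toNat (phone ++ "_2")

def stepA (s : String × Int × List String) (p : String) : String × Int × List String :=
  if p ≠ s.1 then (p, 1, s.2.2 ++ triphonesA s.1 s.2.1) else (s.1, s.2.1 + 1, s.2.2)

def compute_subphones (phones : List String) : List String :=
  match phones with
  | [] => []   -- phones[0] raises IndexError: excluded by Pre_compute_subphones
  | p0 :: _ =>
    let st := phones.foldl stepA (p0, 0, [])
    st.2.2 ++ triphonesA st.1 st.2.1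

-- ===== PORT B =====
-- the loop of Source B's offsets(): state (prev, k), appending each new k (structural recursion)
def offsAux (prev : Option String) (k : Int) : List String → List Int
  | [] => []
  | p :: rest =>
    let k' := if some p = prev then k + 1 else 0
    k' :: offsAux (some p) k' rest

def offsetsB (phones : List String) : List Int := offsAux none 0 phones

-- the body of Source B's zip loop for one frame
def labelB (p : String) (k r : Int) : String :=
  let n := k + r + 1
  if p = "?" ∨ p = "SIL" then p
  else
    let c0 := PySem.Int.floordiv (n + 1) 3
    let t : Int := if k < c0 then 0 else if k < n - c0 then 1 else 2
    p ++ "_" ++ PySem.Int.toStr t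

-- phones[::-1] is ported as List.reverse
def compute_subphones_alt (phones : List String) : List String :=
  let off := offsetsB phones
  let roff := (offsetsB phones.reverse).reverse
  List.zipWith3 labelB phones off roff

-- ===== PRECONDITION & SPEC =====
-- Pre_ excludes only the empty list, on which A raises IndexError at phones[0]
def Pre_compute_subphones (phones : List String) : Prop := phones ≠ []
instance (phones : List String) : Decidable (Pre_compute_subphones phones) := by
  unfold Pre_compute_subphones; infer_instance
def pvWitness_compute_subphones : List String := ["a", "a", "a", "a", "b"]

-- On the empty list A raises IndexError while B returns the empty list.
def Raises_compute_subphones (phones : List String) : Prop := phones = []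
instance (phones : List String) : Decidable (Raises_compute_subphones phones) := by
  unfold Raises_compute_subphones; infer_instance
def pvRaiseWitness_compute_subphones : List String := []
def pvRaiseWitnessOut_compute_subphones : List String := []

def Spec_compute_subphones (phones : List String) (out : List String) : Prop :=
  out = compute_subphones_alt phones
instance (phones : List String) (out : List String) : Decidable (Spec_compute_subphones phones out) := by
  unfold Spec_compute_subphones; infer_instance

-- ===== CLAIM (what is proved, stated in full; the proofs are below) =====
def Claim_equal_compute_subphones : Prop := ∀ (phones : List String),
  Dom_compute_subphones phones → Pre_compute_subphones phones →
    Spec_compute_subphones phones (compute_subphones phones)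

def Claim_raises_compute_subphones : Prop :=
  (∀ (phones : List String), Dom_compute_subphones phones → Raises_compute_subphones phones →
      ¬ Pre_compute_subphones phones) ∧
  (Dom_compute_subphones (pvRaiseWitness_compute_subphones) ∧
    Raises_compute_subphones (pvRaiseWitness_compute_subphones) ∧
    compute_subphones_alt (pvRaiseWitness_compute_subphones) = pvRaiseWitnessOut_compute_subphones)

-- ===== LEMMAS AND PROOFS =====

-- ---- the common reference: recursion on the span (leading run) of the list ----
def refSpan (l : List String) : List String :=
  match l with
  | [] => []
  | p :: rest =>
    triphonesA p (1 + ((rest.takeWhile (fun q => q == p)).length : Int)) ++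
      refSpan (rest.dropWhile (fun q => q == p))
termination_by l.length
decreasing_by
  simp only [List.length_cons]
  have := List.length_dropWhile_le (fun q => q == p) rest
  omega

theorem refSpan_nil : refSpan [] = [] := by rw [refSpan.eq_def]

theorem refSpan_cons (p : String) (rest : List String) :
    refSpan (p :: rest) =
      triphonesA p (1 + ((rest.takeWhile (fun q => q == p)).length : Int)) ++
        refSpan (rest.dropWhile (fun q => q == p)) := by
  rw [refSpan.eq_def]

-- ---- A = refSpan ----
def flushA (st : String × Int × List String) : List String :=
  st.2.2 ++ triphonesA st.1 st.2.1

def gA (tp : String) (n : Int) (l : List String) : List String :=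
  flushA (l.foldl stepA (tp, n, []))

theorem flush_foldl_sub (l : List String) : ∀ (tp : String) (n : Int) (sub : List String),
    flushA (l.foldl stepA (tp, n, sub)) = sub ++ gA tp n l := by
  induction l with
  | nil => intro tp n sub; simp [gA, flushA]
  | cons p rest ih =>
    intro tp n sub
    simp only [List.foldl_cons, stepA, gA]
    by_cases h : p = tp
    · simp [h, ih]
    · simp only [h, ne_eq, not_false_eq_true, if_pos, List.nil_append]
      rw [ih, ih p 1 (triphonesA tp n), List.append_assoc]

theorem gA_cons (tp : String) (n : Int) (p : String) (l : List String) :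
    gA tp n (p :: l) = if p = tp then gA tp (n + 1) l
      else triphonesA tp n ++ gA p 1 l := by
  simp only [gA, List.foldl_cons, stepA]
  by_cases h : p = tp
  · simp [h]
  · simp only [h, ne_eq, not_false_eq_true, if_pos, List.nil_append]
    exact flush_foldl_sub l p 1 (triphonesA tp n)

theorem gA_span (l : List String) : ∀ (tp : String) (n : Int),
    gA tp n l = triphonesA tp (n + ((l.takeWhile (fun q => q == tp)).length : Int)) ++
      refSpan (l.dropWhile (fun q => q == tp)) := by
  induction l with
  | nil => intro tp n; simp [gA, flushA, refSpan]
  | cons q l' ih =>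
    intro tp n
    rw [gA_cons]
    by_cases h : q = tp
    · rw [if_pos h, ih tp (n + 1)]
      have ht : (q :: l').takeWhile (fun q => q == tp) =
          q :: l'.takeWhile (fun q => q == tp) := by
        simp [List.takeWhile_cons, h]
      have hd : (q :: l').dropWhile (fun q => q == tp) =
          l'.dropWhile (fun q => q == tp) := by
        simp [List.dropWhile_cons, h]
      rw [ht, hd, List.length_cons]
      congr 2
      push_cast
      ring
    · rw [if_neg h]
      have ht : (q :: l').takeWhile (fun q => q == tp) = [] := by
        simp [List.takeWhile_cons, h]
      have hd : (q :: l').dropWhile (fun q => q == tp) = q :: l' := by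
        simp [List.dropWhile_cons, h]
      rw [ht, hd]
      show triphonesA tp n ++ gA q 1 l' = _
      rw [ih q 1]
      conv_rhs => rw [refSpan]
      simp

theorem A_eq_ref (l : List String) (hl : l ≠ []) : compute_subphones l = refSpan l := by
  match l with
  | p :: rest =>
    have h0 : compute_subphones (p :: rest) = gA p 0 (p :: rest) := rfl
    rw [h0, gA_cons, if_pos rfl, gA_span]
    conv_rhs => rw [refSpan]
    norm_num

-- ---- B = refSpan ----

-- the state of the offsets scan after consuming a prefix
def stA (prev : Option String) (k : Int) : List String → Option String × Int
  | [] => (prev, k)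
  | p :: rest => stA (some p) (if some p = prev then k + 1 else 0) rest

theorem offsAux_append (xs : List String) : ∀ (prev : Option String) (k : Int) (ys : List String),
    offsAux prev k (xs ++ ys) =
      offsAux prev k xs ++ offsAux (stA prev k xs).1 (stA prev k xs).2 ys := by
  induction xs with
  | nil => intro prev k ys; rfl
  | cons p rest ih =>
    intro prev k ys
    simp only [List.cons_append, offsAux, stA]
    rw [ih]

theorem stA_fst (xs : List String) : ∀ (prev : Option String) (k : Int),
    (stA prev k xs).1 = (xs.getLast?.map some).getD prev := by
  induction xs with
  | nil => intro prev k; rfl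
  | cons p rest ih =>
    intro prev k
    rw [stA, ih]
    cases h : rest.getLast? with
    | some q => simp [List.getLast?_cons, h]
    | none =>
      have : rest = [] := List.getLast?_eq_none_iff.mp h
      subst this; rfl

-- if the head of l differs from the remembered phone, the scan restarts cleanly
theorem offsAux_reset (l : List String) (prev : Option String) (k : Int)
    (h : ∀ q, l.head? = some q → some q ≠ prev) :
    offsAux prev k l = offsAux none 0 l := by
  cases l with
  | nil => rfl
  | cons p rest =>
    have hp : some p ≠ prev := h p rfl
    simp only [offsAux, if_neg hp]
    simp

theorem offsAux_run (m : Nat) : ∀ (p : String) (k : Int) (rest : List String),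
    offsAux (some p) k (List.replicate m p ++ rest) =
      (List.range m).map (fun i : Nat => k + 1 + (i : Int)) ++ offsAux (some p) (k + m) rest := by
  induction m with
  | zero => intro p k rest; simp
  | succ m ih =>
    intro p k rest
    rw [List.replicate_succ, List.cons_append]
    show (if some p = some p then k + 1 else 0) ::
        offsAux (some p) (if some p = some p then k + 1 else 0) (List.replicate m p ++ rest) = _
    rw [if_pos rfl, ih p (k + 1) rest, List.range_succ_eq_map, List.map_cons, List.map_map]
    have h1 : ((fun i : Nat => k + 1 + (i : Int)) ∘ Nat.succ) =
        fun i : Nat => (k + 1) + 1 + (i : Int) := by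
      funext i; simp [Function.comp]; push_cast; ring
    have h2 : k + 1 + (m : Int) = k + ((m + 1 : Nat) : Int) := by push_cast; ring
    rw [h1, h2]
    norm_num

-- a full run starting fresh produces offsets 0,1,…,m-1 and leaves state (p, m-1)
theorem offsets_run (m : Nat) (hm : 1 ≤ m) (p : String) (rest : List String)
    (prev : Option String) (k : Int) (h : some p ≠ prev) :
    offsAux prev k (List.replicate m p ++ rest) =
      (List.range m).map (fun i : Nat => (i : Int)) ++ offsAux (some p) ((m : Int) - 1) rest := by
  obtain ⟨L, rfl⟩ : ∃ L, m = L + 1 := ⟨m - 1, by omega⟩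
  rw [List.replicate_succ, List.cons_append]
  show (if some p = prev then k + 1 else 0) ::
      offsAux (some p) (if some p = prev then k + 1 else 0) (List.replicate L p ++ rest) = _
  rw [if_neg h, offsAux_run L p 0 rest, List.range_succ_eq_map, List.map_cons, List.map_map]
  have h1 : ((fun i : Nat => (i : Int)) ∘ Nat.succ) = fun i : Nat => 0 + 1 + (i : Int) := by
    funext i; simp [Function.comp]; push_cast; ring
  have h2 : (0 : Int) + (L : Int) = ((L + 1 : Nat) : Int) - 1 := by push_cast; ring
  rw [h1, h2]
  norm_num

theorem zipWith3_append {α β γ δ : Type} (f : α → β → γ → δ) :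
    ∀ (a1 : List α) (b1 : List β) (c1 : List γ) (a2 : List α) (b2 : List β) (c2 : List γ),
    a1.length = b1.length → a1.length = c1.length →
    List.zipWith3 f (a1 ++ a2) (b1 ++ b2) (c1 ++ c2) =
      List.zipWith3 f a1 b1 c1 ++ List.zipWith3 f a2 b2 c2 := by
  intro a1
  induction a1 with
  | nil =>
    intro b1 c1 a2 b2 c2 h1 h2
    simp only [List.length_nil] at h1 h2
    rw [List.eq_nil_of_length_eq_zero h1.symm, List.eq_nil_of_length_eq_zero h2.symm]
    rfl
  | cons x xs ih =>
    intro b1 c1 a2 b2 c2 h1 h2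
    cases b1 with
    | nil => simp at h1
    | cons y ys =>
      cases c1 with
      | nil => simp at h2
      | cons z zs =>
        simp only [List.cons_append, List.zipWith3, List.cons.injEq]
        exact ⟨trivial, ih ys zs a2 b2 c2 (by simpa using h1) (by simpa using h2)⟩

theorem zipWith3_replicate_maps {α β γ δ ε : Type} (f : ε → β → γ → δ) (p : ε)
    (g : α → β) (h : α → γ) :
    ∀ (l : List α), List.zipWith3 f (List.replicate l.length p) (l.map g) (l.map h) =
      l.map (fun i => f p (g i) (h i)) := by
  intro l
  induction l with
  | nil => rfl
  | cons x xs ih =>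
    simp only [List.length_cons, List.replicate_succ, List.map_cons, List.zipWith3]
    rw [ih]

theorem map_range_const {α : Type} (n : Nat) (x : α) :
    (List.range n).map (fun _ => x) = List.replicate n x := by
  induction n with
  | zero => rfl
  | succ n ih => rw [List.range_succ, List.map_append, ih]; simp [List.replicate_succ']

theorem map_range_split {α : Type} (a b n : Nat) (f : Nat → α) (x y z : α)
    (hab : a ≤ b) (hbn : b ≤ n)
    (hx : ∀ i, i < a → f i = x) (hy : ∀ i, a ≤ i → i < b → f i = y)
    (hz : ∀ i, b ≤ i → i < n → f i = z) :
    (List.range n).map f =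
      List.replicate a x ++ List.replicate (b - a) y ++ List.replicate (n - b) z := by
  have e1 : (List.range a).map f = List.replicate a x := by
    have hcg : ∀ i ∈ List.range a, f i = x := fun i hi => hx i (List.mem_range.mp hi)
    rw [List.map_congr_left hcg, map_range_const]
  have e2 : (List.range (b - a)).map (fun i => f (a + i)) = List.replicate (b - a) y := by
    have hcg : ∀ i ∈ List.range (b - a), f (a + i) = y := by
      intro i hi; have := List.mem_range.mp hi; exact hy (a + i) (by omega) (by omega)
    rw [List.map_congr_left hcg, map_range_const]
  have e3 : (List.range (n - b)).map (fun i => f (a + (b - a + i))) = List.replicate (n - b) z := by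
    have hcg : ∀ i ∈ List.range (n - b), f (a + (b - a + i)) = z := by
      intro i hi; have := List.mem_range.mp hi; exact hz (a + (b - a + i)) (by omega) (by omega)
    rw [List.map_congr_left hcg, map_range_const]
  have hn : n = a + ((b - a) + (n - b)) := by omega
  conv_lhs => rw [hn, List.range_add, List.range_add]
  simp only [List.map_append, List.map_map, Function.comp_def]
  rw [e1, e2, e3, List.append_assoc]

-- the per-index thresholds reproduce A's replicated thirds for a run of length m
theorem run_labels (p : String) (m : Nat) (hm : 1 ≤ m) :
    (List.range m).map (fun i : Nat => labelB p (i : Int) ((m - 1 - i : Nat) : Int)) =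
      triphonesA p (m : Int) := by
  by_cases hp : p = "?" ∨ p = "SIL"
  · rw [triphonesA, if_pos hp]
    have : ∀ i ∈ List.range m, labelB p (i : Int) ((m - 1 - i : Nat) : Int) = p := by
      intro i _; simp [labelB, hp]
    rw [List.map_congr_left this, map_range_const]
    simp
  · have hlab : ∀ i, i < m → labelB p (i : Int) ((m - 1 - i : Nat) : Int) =
        (if (i : Int) < PySem.Int.floordiv ((m : Int) + 1) 3 then p ++ "_" ++ PySem.Int.toStr 0
         else if (i : Int) < (m : Int) - PySem.Int.floordiv ((m : Int) + 1) 3 then p ++ "_" ++ PySem.Int.toStr 1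
         else p ++ "_" ++ PySem.Int.toStr 2) := by
      intro i hi
      have hsum : (i : Int) + ((m - 1 - i : Nat) : Int) + 1 = (m : Int) := by omega
      simp only [labelB, if_neg hp, hsum]
      split_ifs <;> rfl
    have hfd : PySem.Int.floordiv ((m : Int) + 1) 3 = (((m + 1) / 3 : Nat) : Int) := by
      have h' : ((m : Int) + 1) = ((m + 1 : Nat) : Int) := by push_cast; ring
      rw [h']
      exact_mod_cast PySem.Int.floordiv_natCast (m + 1) 3
    have hfd2 : PySem.Int.floordiv (m : Int) 3 = ((m / 3 : Nat) : Int) := by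
      exact_mod_cast PySem.Int.floordiv_natCast m 3
    have hmod : PySem.Int.mod (m : Int) 3 = ((m % 3 : Nat) : Int) := by
      exact_mod_cast PySem.Int.mod_natCast m 3
    set c0 : Nat := (m + 1) / 3 with hc0
    have hsplit : (List.range m).map (fun i : Nat => labelB p (i : Int) ((m - 1 - i : Nat) : Int)) =
        List.replicate c0 (p ++ "_" ++ PySem.Int.toStr 0) ++
        List.replicate ((m - c0) - c0) (p ++ "_" ++ PySem.Int.toStr 1) ++
        List.replicate (m - (m - c0)) (p ++ "_" ++ PySem.Int.toStr 2) := by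
      apply map_range_split c0 (m - c0) m _ _ _ _ (by omega) (by omega)
      · intro i hi; rw [hlab i (by omega), if_pos (by rw [hfd]; exact_mod_cast hi)]
      · intro i h1 h2
        rw [hlab i (by omega), if_neg (by rw [hfd]; push_cast; omega),
          if_pos (by rw [hfd]; push_cast; omega)]
      · intro i h1 h2
        rw [hlab i (by omega), if_neg (by rw [hfd]; push_cast; omega),
          if_neg (by rw [hfd]; push_cast; omega)]
    have h0 : PySem.Int.toStr 0 = "0" := rfl
    have h1' : PySem.Int.toStr 1 = "1" := rfl
    have h2' : PySem.Int.toStr 2 = "2" := rfl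
    rw [hsplit, triphonesA, if_neg hp, h0, h1', h2', hfd2, hmod]
    have htn : ∀ k : Nat, ((k : Int)).toNat = k := fun k => by omega
    have htn1 : ∀ k : Nat, (((k : Int)) + 1).toNat = k + 1 := fun k => by omega
    have h3 : m % 3 = 0 ∨ m % 3 = 1 ∨ m % 3 = 2 := by omega
    rcases h3 with h | h | h
    · rw [if_pos (by exact_mod_cast h), htn]
      rw [show (m - c0) - c0 = m / 3 by omega, show m - (m - c0) = m / 3 by omega,
        show c0 = m / 3 by omega]
      simp only [String.append_assoc]
      rfl
    · rw [if_neg (by rw [h]; simp), if_pos (by exact_mod_cast h), htn, htn1]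
      rw [show (m - c0) - c0 = m / 3 + 1 by omega, show m - (m - c0) = m / 3 by omega,
        show c0 = m / 3 by omega]
      simp only [String.append_assoc]
      rfl
    · rw [if_neg (by rw [h]; simp), if_neg (by rw [h]; simp), htn, htn1]
      rw [show (m - c0) - c0 = m / 3 by omega, show m - (m - c0) = m / 3 + 1 by omega,
        show c0 = m / 3 + 1 by omega]
      simp only [String.append_assoc]
      rfl

theorem takeWhile_eq_replicate (p : String) (l : List String) :
    l.takeWhile (fun q => q == p) = List.replicate (l.takeWhile (fun q => q == p)).length p := by
  apply List.eq_replicate_iff.mpr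
  refine ⟨rfl, ?_⟩
  intro b hb
  have := List.mem_takeWhile_imp hb
  simpa using this

theorem head_dropWhile_ne (p : String) (l : List String) :
    ∀ q, (l.dropWhile (fun q => q == p)).head? = some q → q ≠ p := by
  intro q hq
  have := List.head?_dropWhile_not (fun q => q == p) l
  rw [hq] at this
  simpa using this

theorem range_reverse_map (m : Nat) :
    (List.range m).reverse = (List.range m).map (fun i => m - 1 - i) := by
  apply List.ext_getElem (by simp)
  intro i h1 h2
  simp

-- the run decomposition of B's three lists
theorem B_run_step (p : String) (m : Nat) (hm : 1 ≤ m) (rest : List String)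
    (hrest : ∀ q, rest.head? = some q → q ≠ p) :
    compute_subphones_alt (List.replicate m p ++ rest) =
      triphonesA p (m : Int) ++ compute_subphones_alt rest := by
  have hoff : offsetsB (List.replicate m p ++ rest) =
      (List.range m).map (fun i : Nat => (i : Int)) ++ offsetsB rest := by
    rw [offsetsB, offsets_run m hm p rest none 0 (by simp),
      offsAux_reset rest (some p) _ (fun q hq => by simpa using hrest q hq)]
    rfl
  have hst : some p ≠ (stA none 0 rest.reverse).1 := by
    rw [stA_fst]
    cases h : rest.reverse.getLast? with
    | none => simp
    | some q =>
      have hq : rest.head? = some q := by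
        rw [← List.getLast?_reverse]; simpa using h
      simp only [Option.map_some, Option.getD_some]
      exact fun he => (hrest q hq) (by injection he with h'; exact h'.symm)
  have hroff : offsetsB (List.replicate m p ++ rest).reverse =
      offsetsB rest.reverse ++ (List.range m).map (fun i : Nat => (i : Int)) := by
    rw [List.reverse_append, List.reverse_replicate, offsetsB,
      offsAux_append rest.reverse none 0 (List.replicate m p),
      ← List.append_nil (List.replicate m p),
      offsets_run m hm p [] _ _ hst]
    simp [offsetsB, offsAux]
  rw [compute_subphones_alt, hoff, hroff, List.reverse_append,
    compute_subphones_alt]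
  rw [zipWith3_append labelB (List.replicate m p) _ _ _ _ _ (by simp) (by simp)]
  congr 1
  have hrev : ((List.range m).map (fun i : Nat => (i : Int))).reverse =
      (List.range m).map (fun i : Nat => ((m - 1 - i : Nat) : Int)) := by
    rw [← List.map_reverse, range_reverse_map, List.map_map]
    rfl
  rw [hrev]
  have := zipWith3_replicate_maps labelB p (fun i : Nat => (i : Int))
    (fun i : Nat => ((m - 1 - i : Nat) : Int)) (List.range m)
  rw [List.length_range] at this
  rw [this]
  exact run_labels p m hm

theorem B_eq_ref : ∀ (n : Nat) (l : List String), l.length ≤ n →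
    compute_subphones_alt l = refSpan l := by
  intro n
  induction n with
  | zero =>
    intro l h
    have : l = [] := by cases l <;> simp_all
    subst this
    rw [refSpan_nil]
    rfl
  | succ n ih =>
    intro l h
    cases l with
    | nil => rw [refSpan_nil]; rfl
    | cons p rest =>
      obtain ⟨L, hL⟩ : ∃ L, rest.takeWhile (fun q => q == p) = List.replicate L p :=
        ⟨_, takeWhile_eq_replicate p rest⟩
      have hLen : (rest.takeWhile (fun q => q == p)).length = L := by rw [hL]; simp
      have hdec : p :: rest = List.replicate (L + 1) p ++ rest.dropWhile (fun q => q == p) := by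
        rw [List.replicate_succ, List.cons_append, ← hL, List.takeWhile_append_dropWhile]
      conv_lhs => rw [hdec]
      rw [B_run_step p (L + 1) (by omega) _ (head_dropWhile_ne p rest), refSpan_cons]
      congr 1
      · rw [hLen]
        congr 1
        push_cast
        ring
      · exact ih _ (le_trans (List.length_dropWhile_le _ _) (by simpa using h))

-- ===== VERDICT (by name: the statement is the Claim_ definition above) =====
theorem compute_subphones_spec : Claim_equal_compute_subphones := by
  intro phones _ hpre
  unfold Spec_compute_subphones
  rw [A_eq_ref phones hpre, B_eq_ref phones.length phones le_rfl]

@[simp] theorem compute_subphones_raises : Claim_raises_compute_subphones := by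
  unfold Claim_raises_compute_subphones
  refine ⟨fun phones _ hr => ?_, by decide, by decide, by decide⟩
  unfold Raises_compute_subphones at hr
  unfold Pre_compute_subphones
  simp [hr]
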